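-- pv_equiv track=rewrite | github.com/sogoten6689/parallel-corpus | backend/services/master_row_word_service.py | extract_main_id
-- ===== SOURCE A (Python) =====
-- BOM = "\ufeff"
--
-- def extract_main_id(id_str: str) -> str:
--     """Extract core numeric ID from formats like 'VD01821301' -> '01821301'.
--     - Removes BOM if present
--     - Trims whitespace
--     - Returns original if no pattern match; stays safe for downstream filters
--     """
--     if id_str is None:
--         return ""
--     s = id_str.replace(BOM, "").strip()
--     # Keep last 8 digits if length >= 8
--     digits = "".join(ch for ch in s if ch.isdigit())
--     if len(digits) >= 8:
--         return digits[-8:]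
--     return s
-- ===== SOURCE B (Python) =====
-- BOM = "\ufeff"
--
-- def extract_main_id(id_str: str) -> str:
--     """Right-to-left scan: collect digits into a buffer, stop as soon as 8
--     are found; return the buffer if it has exactly 8 digits, else s."""
--     if id_str is None:
--         return ""
--     s = id_str.replace(BOM, "").strip()
--     buf = ""
--     for ch in reversed(s):
--         if ch.isdigit():
--             buf = ch + buf
--             if len(buf) == 8:
--                 break
--     if len(buf) == 8:
--         return buf
--     return s
-- ===== Notes on version B (the rewrite author's own statement) =====
-- stated objective: alternative
-- what changed: Instead of filtering all digits of s into a string and slicing its last 8, B scans s right-to-left maintaining only an at-most-8-character digit buffer and stops early once 8 digits are collected.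
import Mathlib
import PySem

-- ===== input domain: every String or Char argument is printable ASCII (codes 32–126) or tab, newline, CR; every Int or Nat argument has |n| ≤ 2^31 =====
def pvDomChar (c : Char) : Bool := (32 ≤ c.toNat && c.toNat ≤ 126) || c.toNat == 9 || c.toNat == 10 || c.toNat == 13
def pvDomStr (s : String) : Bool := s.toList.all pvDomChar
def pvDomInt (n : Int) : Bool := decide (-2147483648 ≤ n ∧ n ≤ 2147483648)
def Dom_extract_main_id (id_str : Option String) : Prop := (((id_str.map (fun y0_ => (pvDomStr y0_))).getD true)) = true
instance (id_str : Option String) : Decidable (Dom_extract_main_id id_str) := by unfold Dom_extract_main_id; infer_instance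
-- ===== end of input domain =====

-- ===== PORT A =====
-- B changes only the digit-extraction step: right-to-left scan with an 8-char
-- buffer and early exit instead of filtering all digits and slicing. Objective: alternative.
def extract_main_id (id_str : Option String) : String :=
  match id_str with
  | none => ""
  | some t =>
    let s := PySem.Str.strip (PySem.Str.replace t "\uFEFF" "")
    let digits := String.ofList (s.toList.filter PySem.Chars.isdigit)
    if 8 ≤ PySem.Str.len digits then PySem.Str.slice digits (some (-8)) none
    else s

-- ===== PORT B =====
-- the 'for ch in reversed(s)' loop of Source B: prepend digit chars, break at 8
def pvScan : List Char → List Char → List Char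
  | [], buf => buf
  | c :: rest, buf =>
    if PySem.Chars.isdigit c then
      let buf' := c :: buf
      if buf'.length = 8 then buf' else pvScan rest buf'
    else pvScan rest buf

def extract_main_id_alt (id_str : Option String) : String :=
  match id_str with
  | none => ""
  | some t =>
    let s := PySem.Str.strip (PySem.Str.replace t "\uFEFF" "")
    let buf := pvScan s.toList.reverse []
    if buf.length = 8 then String.ofList buf else s

-- ===== PRECONDITION & SPEC =====
def Spec_extract_main_id (id_str : Option String) (out : String) : Prop := out = extract_main_id_alt id_str
instance (id_str : Option String) (out : String) : Decidable (Spec_extract_main_id id_str out) := by unfold Spec_extract_main_id; infer_instance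

-- ===== CLAIM (what is proved, stated in full; the proofs are below) =====
def Claim_equal_extract_main_id : Prop := ∀ (id_str : Option String), Dom_extract_main_id id_str → Spec_extract_main_id id_str (extract_main_id id_str)

-- ===== LEMMAS AND PROOFS =====
theorem pvScan_eq (l : List Char) (buf : List Char) (h : buf.length < 8) :
    pvScan l buf = ((l.filter PySem.Chars.isdigit).take (8 - buf.length)).reverse ++ buf := by
  induction l generalizing buf with
  | nil => simp [pvScan]
  | cons c rest ih =>
    by_cases hc : PySem.Chars.isdigit c
    · by_cases h8 : buf.length + 1 = 8
      · have h1 : 8 - buf.length = 1 := by omega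
        simp [pvScan, hc, h8, h1]
      · have h1 : 8 - buf.length = (8 - (buf.length + 1)) + 1 := by omega
        simp [pvScan, hc, h8, ih (c :: buf) (by simp; omega), h1, List.take_succ_cons]
    · simp [pvScan, hc, ih buf h]

theorem pvTail_eq (s : String) :
    (if 8 ≤ PySem.Str.len (String.ofList (s.toList.filter PySem.Chars.isdigit)) then
        PySem.Str.slice (String.ofList (s.toList.filter PySem.Chars.isdigit)) (some (-8)) none
      else s)
    = (if (pvScan s.toList.reverse []).length = 8 then String.ofList (pvScan s.toList.reverse []) else s) := by
  have hscan : pvScan s.toList.reverse [] =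
      ((s.toList.filter PySem.Chars.isdigit).reverse.take 8).reverse := by
    rw [pvScan_eq _ _ (by simp)]
    simp [List.filter_reverse]
  set f := s.toList.filter PySem.Chars.isdigit with hf
  by_cases h8 : 8 ≤ f.length
  · have hlen : (pvScan s.toList.reverse []).length = 8 := by
      simp [hscan]; omega
    rw [if_pos (by simpa using h8), if_pos hlen]
    apply String.toList_injective
    simp only [PySem.Str.toList_slice, PySem.Chars.slice_eq_listSlice, String.toList_ofList]
    rw [PySem.List.slice_from_neg_ofNat _ 8 (by omega), hscan]
    simp [List.take_reverse]
  · have hlen : (pvScan s.toList.reverse []).length ≠ 8 := by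
      simp [hscan]; omega
    rw [if_neg (by simpa using h8), if_neg hlen]

-- ===== VERDICT (by name: the statement is the Claim_ definition above) =====
theorem extract_main_id_spec : Claim_equal_extract_main_id := by
  intro id_str _
  unfold Spec_extract_main_id
  cases id_str with
  | none => rfl
  | some t =>
    simp only [extract_main_id, extract_main_id_alt]
    exact pvTail_eq _
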